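-- pv_equiv track=rewrite | github.com/pocotu/tod | Python/Progra 1/3.py | ciudades_con_entrada_y_sin_salida
-- ===== SOURCE A (Python) =====
-- def ciudades_con_entrada_y_sin_salida(Mat):
--     respuesta = []
--     for i in range(len(Mat)):
--         if sum(Mat[i]) == 0 and sum([Mat[j][i] for j in range(len(Mat))]) > 0:
--             respuesta.append(True)
--         else:
--             respuesta.append(False)
--     return respuesta
-- ===== SOURCE B (Python) =====
-- def ciudades_con_entrada_y_sin_salida(Mat):
--     n = len(Mat)
--     col_sums = [0] * n
--     row_zero = []
--     for row in Mat:
--         row_zero.append(sum(row) == 0)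
--         for i, v in enumerate(row[:n]):
--             col_sums[i] += v
--     return [rz and cs > 0 for rz, cs in zip(row_zero, col_sums)]
-- ===== Notes on version B (the rewrite author's own statement) =====
-- stated objective: alternative
-- what changed: B replaces A's per-city inner column scan (rebuilding [Mat[j][i] for j in range(n)] inside the row loop) with a single accumulation pass that maintains a col_sums vector updated elementwise by each row, then zips the row-zero flags with the finished column sums.
import Mathlib
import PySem

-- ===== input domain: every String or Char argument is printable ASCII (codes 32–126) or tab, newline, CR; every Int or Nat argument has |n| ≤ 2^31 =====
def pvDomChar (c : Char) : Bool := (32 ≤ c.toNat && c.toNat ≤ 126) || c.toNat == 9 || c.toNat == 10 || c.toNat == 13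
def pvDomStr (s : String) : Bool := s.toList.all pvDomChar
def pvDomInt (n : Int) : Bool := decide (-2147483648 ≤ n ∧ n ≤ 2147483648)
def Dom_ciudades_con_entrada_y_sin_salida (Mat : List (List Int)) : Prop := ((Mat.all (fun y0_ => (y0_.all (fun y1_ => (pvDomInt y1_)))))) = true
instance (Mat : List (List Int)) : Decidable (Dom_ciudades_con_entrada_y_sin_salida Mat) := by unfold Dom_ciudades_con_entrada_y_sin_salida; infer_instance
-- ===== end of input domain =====

-- B replaces A's per-city inner column scan with a single accumulation pass that maintains a
-- col_sums vector updated elementwise by each row, then zips the row-zero flags with the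
-- finished column sums (objective: alternative).

-- ===== PORT A =====
def ciudades_con_entrada_y_sin_salida (Mat : List (List Int)) : List Bool :=
  (PySem.List.pyRange 0 (Mat.length : Int) 1).foldl
    (fun respuesta i =>
      if (PySem.List.pyGetD Mat i []).sum = 0 ∧
         0 < ((PySem.List.pyRange 0 (Mat.length : Int) 1).map
               (fun j => PySem.List.pyGetD (PySem.List.pyGetD Mat j []) i 0)).sum
      then respuesta ++ [true]
      else respuesta ++ [false]) []

-- ===== PORT B =====
-- single pass over the rows: append the row's zero-sum flag, and fold the row's (truncated)
-- entries into the running col_sums vector; then zip flags with the finished column sums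
def ciudades_con_entrada_y_sin_salida_alt (Mat : List (List Int)) : List Bool :=
  let n : Nat := Mat.length
  let st := Mat.foldl
    (fun (st : List Int × List Bool) row =>
      ((PySem.List.enumerate (PySem.List.slice row none (some (n : Int))) 0).foldl
         (fun cs p => cs.set p.1.toNat (cs.getD p.1.toNat 0 + p.2)) st.1,
       st.2 ++ [decide (row.sum = 0)]))
    (List.replicate n 0, [])
  (st.2.zip st.1).map (fun p => p.1 && decide (0 < p.2))

-- ===== PRECONDITION & SPEC =====
-- A raises IndexError exactly when some row i with zero sum has its column i reach past the
-- end of a row (the `and` short-circuit means a nonzero-sum row never touches its column);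
-- Pre_ is exactly A's raise-free domain.
def Pre_ciudades_con_entrada_y_sin_salida (Mat : List (List Int)) : Prop :=
  ∀ i < Mat.length, (Mat.getD i []).sum = 0 → ∀ row ∈ Mat, i < row.length
instance (Mat : List (List Int)) : Decidable (Pre_ciudades_con_entrada_y_sin_salida Mat) := by
  unfold Pre_ciudades_con_entrada_y_sin_salida; infer_instance

def pvWitness_ciudades_con_entrada_y_sin_salida : List (List Int) := [[0, 1], [-1, 0]]

def Spec_ciudades_con_entrada_y_sin_salida (Mat : List (List Int)) (out : List Bool) : Prop :=
  out = ciudades_con_entrada_y_sin_salida_alt Mat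
instance (Mat : List (List Int)) (out : List Bool) : Decidable (Spec_ciudades_con_entrada_y_sin_salida Mat out) := by
  unfold Spec_ciudades_con_entrada_y_sin_salida; infer_instance

-- ===== CLAIM =====
def Claim_equal_ciudades_con_entrada_y_sin_salida : Prop :=
  ∀ (Mat : List (List Int)), Dom_ciudades_con_entrada_y_sin_salida Mat →
    Pre_ciudades_con_entrada_y_sin_salida Mat →
    Spec_ciudades_con_entrada_y_sin_salida Mat (ciudades_con_entrada_y_sin_salida Mat)

-- ===== LEMMAS AND PROOFS =====

theorem pv_addLoop (xs : List Int) : ∀ (s : Nat) (cs : List Int),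
    ((PySem.List.enumerate xs (s : Int)).foldl
        (fun cs p => cs.set p.1.toNat (cs.getD p.1.toNat 0 + p.2)) cs).length = cs.length ∧
    ∀ k < cs.length,
      ((PySem.List.enumerate xs (s : Int)).foldl
          (fun cs p => cs.set p.1.toNat (cs.getD p.1.toNat 0 + p.2)) cs).getD k 0 =
        cs.getD k 0 + (if s ≤ k ∧ k < s + xs.length then xs.getD (k - s) 0 else 0) := by
  induction xs with
  | nil => intro s cs; simp [PySem.List.enumerate_nil]
  | cons x xs ih =>
    intro s cs
    have hcast : (s : Int) + 1 = ((s + 1 : Nat) : Int) := by push_cast; ring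
    rw [PySem.List.enumerate_cons, List.foldl_cons, hcast]
    obtain ⟨hlen, hval⟩ := ih (s + 1) (cs.set (s : Int).toNat ((cs.getD (s : Int).toNat 0 + x)))
    constructor
    · simpa using hlen
    · intro k hk
      have hk' : k < (cs.set (s : Int).toNat (cs.getD (s : Int).toNat 0 + x)).length := by simpa using hk
      rw [hval k hk']
      have hset : ∀ m, (cs.set s (cs.getD s 0 + x)).getD m 0 =
          if m = s ∧ s < cs.length then cs.getD s 0 + x else cs.getD m 0 := by
        intro m
        by_cases h1 : s = m
        · subst h1
          by_cases h2 : s < cs.length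
          · simp [List.getD, List.getElem?_set, h2]
          · simp [List.getD, List.getElem?_set, h2, List.getElem?_eq_none (le_of_not_gt h2)]
        · have h1' : ¬ (m = s ∧ s < cs.length) := fun h => h1 h.1.symm
          simp [List.getD, List.getElem?_set, h1, h1']
      simp only [Int.toNat_natCast] at *
      rw [hset k]
      by_cases hks : k = s ∧ s < cs.length
      · obtain ⟨rfl, _⟩ := hks
        simp
        omega
      · -- k ≠ s or s ≥ cs.length (latter impossible combined with k<len when s ≤ k)
        simp only [hks, if_false]
        by_cases h1 : s + 1 ≤ k ∧ k < s + 1 + xs.length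
        · have h2 : s ≤ k ∧ k < s + (xs.length + 1) := by omega
          simp [h1, h2]
          have : k - s = (k - (s+1)) + 1 := by omega
          rw [this]
          simp
        · by_cases h2 : s ≤ k ∧ k < s + (xs.length + 1)
          · -- then k = s, and since ¬hks, s ≥ cs.length; but k < cs.length and k = s contradiction
            have : k = s := by omega
            subst this
            exact absurd ⟨rfl, hk⟩ hks
          · have hno : ¬ (s ≤ k ∧ k < s + (x :: xs).length) := by
              simp only [List.length_cons]; omega
            rw [if_neg h1, if_neg hno, add_zero]

theorem pv_outer (n : Nat) (L : List (List Int)) : ∀ (cs : List Int) (acc : List Bool),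
    (L.foldl
      (fun (st : List Int × List Bool) row =>
        ((PySem.List.enumerate (PySem.List.slice row none (some (n : Int))) 0).foldl
           (fun cs p => cs.set p.1.toNat (cs.getD p.1.toNat 0 + p.2)) st.1,
         st.2 ++ [decide (row.sum = 0)]))
      (cs, acc)).2 = acc ++ L.map (fun row => decide (row.sum = 0)) ∧
    (L.foldl
      (fun (st : List Int × List Bool) row =>
        ((PySem.List.enumerate (PySem.List.slice row none (some (n : Int))) 0).foldl
           (fun cs p => cs.set p.1.toNat (cs.getD p.1.toNat 0 + p.2)) st.1,
         st.2 ++ [decide (row.sum = 0)]))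
      (cs, acc)).1.length = cs.length ∧
    ∀ k < cs.length,
      (L.foldl
        (fun (st : List Int × List Bool) row =>
          ((PySem.List.enumerate (PySem.List.slice row none (some (n : Int))) 0).foldl
             (fun cs p => cs.set p.1.toNat (cs.getD p.1.toNat 0 + p.2)) st.1,
           st.2 ++ [decide (row.sum = 0)]))
        (cs, acc)).1.getD k 0 =
        cs.getD k 0 + (L.map (fun row => (row.take n).getD k 0)).sum := by
  induction L with
  | nil => intro cs acc; simp
  | cons row L ih =>
    intro cs acc
    rw [List.foldl_cons]
    have hsl : PySem.List.slice row none (some (n : Int)) = row.take n :=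
      PySem.List.slice_to_natCast row n
    set cs' := (PySem.List.enumerate (PySem.List.slice row none (some (n : Int))) 0).foldl
        (fun cs p => cs.set p.1.toNat (cs.getD p.1.toNat 0 + p.2)) cs with hcs'
    obtain ⟨hadd_len, hadd_val⟩ := pv_addLoop (row.take n) 0 cs
    have hlen' : cs'.length = cs.length := by
      rw [hcs', hsl]; exact_mod_cast hadd_len
    obtain ⟨h2', hlen2, hval2⟩ := ih cs' (acc ++ [decide (row.sum = 0)])
    refine ⟨by simpa using h2', by rw [hlen2, hlen'], ?_⟩
    intro k hk
    rw [hval2 k (by rw [hlen']; exact hk)]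
    have : cs'.getD k 0 = cs.getD k 0 + (row.take n).getD k 0 := by
      rw [hcs', hsl]
      have := hadd_val k hk
      simp only [Nat.cast_zero] at this ⊢
      rw [this]
      by_cases hkl : k < (row.take n).length
      · rw [if_pos ⟨Nat.zero_le _, by omega⟩, Nat.sub_zero]
      · rw [if_neg (by omega : ¬((0:Nat) ≤ k ∧ k < 0 + (row.take n).length))]
        simp [List.getD, List.getElem?_eq_none (le_of_not_gt hkl)]
    rw [this]
    simp [add_assoc]


theorem pv_alt_unfold (Mat : List (List Int)) : ciudades_con_entrada_y_sin_salida_alt Mat =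
    ((Mat.foldl
      (fun (st : List Int × List Bool) row =>
        ((PySem.List.enumerate (PySem.List.slice row none (some ((Mat.length : Nat) : Int))) 0).foldl
           (fun cs p => cs.set p.1.toNat (cs.getD p.1.toNat 0 + p.2)) st.1,
         st.2 ++ [decide (row.sum = 0)]))
      (List.replicate Mat.length 0, [])).2.zip
     (Mat.foldl
      (fun (st : List Int × List Bool) row =>
        ((PySem.List.enumerate (PySem.List.slice row none (some ((Mat.length : Nat) : Int))) 0).foldl
           (fun cs p => cs.set p.1.toNat (cs.getD p.1.toNat 0 + p.2)) st.1,
         st.2 ++ [decide (row.sum = 0)]))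
      (List.replicate Mat.length 0, [])).1).map (fun p => p.1 && decide (0 < p.2)) := rfl

theorem pv_main (Mat : List (List Int)) (hpre : Pre_ciudades_con_entrada_y_sin_salida Mat) : ciudades_con_entrada_y_sin_salida Mat = ciudades_con_entrada_y_sin_salida_alt Mat := by
  unfold ciudades_con_entrada_y_sin_salida
  rw [pv_alt_unfold]
  have hfun : (fun (respuesta : List Bool) (i : Int) =>
      if (PySem.List.pyGetD Mat i []).sum = 0 ∧
         0 < ((PySem.List.pyRange 0 (Mat.length : Int) 1).map
               (fun j => PySem.List.pyGetD (PySem.List.pyGetD Mat j []) i 0)).sum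
      then respuesta ++ [true]
      else respuesta ++ [false]) =
      (fun respuesta i => respuesta ++
        [decide ((PySem.List.pyGetD Mat i []).sum = 0 ∧
          0 < ((PySem.List.pyRange 0 (Mat.length : Int) 1).map
               (fun j => PySem.List.pyGetD (PySem.List.pyGetD Mat j []) i 0)).sum)]) := by
    funext respuesta i
    split_ifs with h <;> simp [h]
  rw [hfun, PySem.List.foldl_append_singleton_eq_map, List.nil_append]
  obtain ⟨hflags, hlen, hval⟩ :=
    pv_outer Mat.length Mat (List.replicate Mat.length 0) []
  simp only [List.nil_append] at hflags
  set st := Mat.foldl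
    (fun (st : List Int × List Bool) row =>
      ((PySem.List.enumerate (PySem.List.slice row none (some ((Mat.length : Nat) : Int))) 0).foldl
         (fun cs p => cs.set p.1.toNat (cs.getD p.1.toNat 0 + p.2)) st.1,
       st.2 ++ [decide (row.sum = 0)]))
    (List.replicate Mat.length 0, []) with hst
  have hlenB : st.1.length = Mat.length := by rw [hlen]; simp
  have hlenF : st.2.length = Mat.length := by rw [hflags]; simp
  apply List.ext_getElem
  · simp [PySem.List.length_pyRange_one, hlenB, hlenF]
  · intro k h1 h2
    have hk : k < Mat.length := by
      simpa [PySem.List.length_pyRange_one] using h1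
    have hrange := PySem.List.pyRange_zero_natCast Mat.length
    have h1' : k < (PySem.List.pyRange 0 ((Mat.length : Nat) : Int) 1).length := by
      simpa [PySem.List.length_pyRange_one] using hk
    have hAk : ((PySem.List.pyRange 0 (Mat.length : Int) 1).map
        (fun i => decide ((PySem.List.pyGetD Mat i []).sum = 0 ∧
          0 < ((PySem.List.pyRange 0 (Mat.length : Int) 1).map
               (fun j => PySem.List.pyGetD (PySem.List.pyGetD Mat j []) i 0)).sum)))[k]'h1 =
        decide ((Mat.getD k []).sum = 0 ∧
          0 < ((PySem.List.pyRange 0 (Mat.length : Int) 1).map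
               (fun j => PySem.List.pyGetD (PySem.List.pyGetD Mat j []) (k : Int) 0)).sum) := by
      simp only [List.getElem_map]
      congr 2
      · have : (PySem.List.pyRange 0 ((Mat.length : Nat) : Int) 1)[k]'h1' = ((k : Nat) : Int) := by
          simp only [List.getElem_of_eq hrange, List.getElem_map, List.getElem_range]
        rw [this, PySem.List.pyGetD_natCast]
      · have : (PySem.List.pyRange 0 ((Mat.length : Nat) : Int) 1)[k]'h1' = ((k : Nat) : Int) := by
          simp only [List.getElem_of_eq hrange, List.getElem_map, List.getElem_range]
        rw [this]
    rw [hAk]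
    have hcolA : ((PySem.List.pyRange 0 (Mat.length : Int) 1).map
        (fun j => PySem.List.pyGetD (PySem.List.pyGetD Mat j []) (k : Int) 0)) =
        Mat.map (fun row => row.getD k 0) := by
      have hcomp : (fun j => PySem.List.pyGetD (PySem.List.pyGetD Mat j []) (k : Int) 0) =
          (fun row => PySem.List.pyGetD row (k : Int) 0) ∘ (fun j => PySem.List.pyGetD Mat j []) := rfl
      rw [hcomp, ← List.map_map]
      have hlenEq : ((Mat.length : Nat) : Int) = PySem.List.len Mat := by simp [PySem.List.len]
      rw [hlenEq, PySem.List.map_pyGetD_pyRange_zero]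
      exact List.map_congr_left (fun row _ => PySem.List.pyGetD_natCast row k 0)
    rw [hcolA]
    simp only [List.getElem_map, List.getElem_zip]
    have hflag : st.2[k]'(by omega) = decide ((Mat[k]'hk).sum = 0) := by
      have h5 : st.2[k]'(by omega) = (Mat.map (fun row => decide (row.sum = 0)))[k]'(by simpa using hk) := by
        congr 1
      simpa using h5
    have hsum : st.1[k]'(by omega) =
        (Mat.map (fun row => (row.take Mat.length).getD k 0)).sum := by
      have h6 := hval k (by simpa using hk)
      rw [List.getD_eq_getElem _ _ (by omega)] at h6
      simpa using h6
    rw [hflag, hsum]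
    have hgd : Mat.getD k [] = Mat[k]'hk := by
      simp [List.getD, List.getElem?_eq_getElem hk]
    rw [hgd]
    by_cases hS : (Mat[k]'hk).sum = 0
    · have hcols : Mat.map (fun row => row.getD k 0) =
          Mat.map (fun row => (row.take Mat.length).getD k 0) := by
        apply List.map_congr_left
        intro row hrow
        have hkr : k < row.length := hpre k hk (by rw [hgd]; exact hS) row hrow
        have hkt : k < (row.take Mat.length).length := by simp; omega
        rw [List.getD_eq_getElem _ _ hkr, List.getD_eq_getElem _ _ hkt]
        simp
      rw [hcols]
      simp [hS]
    · simp [hS]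

theorem ciudades_con_entrada_y_sin_salida_spec : Claim_equal_ciudades_con_entrada_y_sin_salida := by
  intro Mat _ hpre
  unfold Spec_ciudades_con_entrada_y_sin_salida
  exact pv_main Mat hpre
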